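-- pv_equiv track=rewrite | github.com/golam-m-hossain/anubadok | anubadok/ens_parser.py | get_string_in_between
-- ===== SOURCE A (Python) =====
-- def get_string_in_between(starting_position, end_TAG, sentence_input):
--     """
--     Return the string between the position and given TAG or SENT
--
--     Args:
--         starting_position: Starting index
--         end_TAG: Tag to look for
--         sentence_input: List of word\tTAG\tlemma strings
--
--     Returns:
--         List of words between positions
--     """
--     sentence_output = []
--
--     for word_position in range(starting_position, len(sentence_input)):
--         sts = sentence_input[word_position]
--         wds_array = sts.split('\t')
--         tag = wds_array[1] if len(wds_array) > 1 else ''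
--         word = wds_array[0].lower() if wds_array[0] else ''
--
--         if (tag in ["SENT", ","] or
--             word in ["that", "then"] or
--             tag == "CC" or
--             tag == end_TAG):
--             sentence_output.append(sts)
--             return sentence_output
--
--         sentence_output.append(sts)
--
--     return sentence_output
-- ===== SOURCE B (Python) =====
-- def _stops(sts, end_TAG):
--     wds_array = sts.split('\t')
--     tag = wds_array[1] if len(wds_array) > 1 else ''
--     word = wds_array[0].lower() if wds_array[0] else ''
--     return (tag in ["SENT", ","] or
--             word in ["that", "then"] or
--             tag == "CC" or
--             tag == end_TAG)
--
--
-- def get_string_in_between(starting_position, end_TAG, sentence_input):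
--     segment = sentence_input[starting_position:]
--     stops = [i for i, s in enumerate(segment) if _stops(s, end_TAG)]
--     if stops:
--         return segment[:min(stops) + 1]
--     return segment
-- ===== Notes on version B (the rewrite author's own statement) =====
-- stated objective: alternative
-- what changed: Replaces A's accumulate-and-early-return index loop with staged full passes: slice off the suffix, collect the index list of ALL stopping elements with a comprehension over enumerate (no early exit), and slice up to min(stops)+1 if that list is nonempty.
-- intended difference: On negative starting_position, A applies Python negative indexing inside range(sp, len): it walks the last |sp| elements and then, unless one of them is a stopping element, re-scans the whole list from index 0 (returning the suffix plus a re-scan), while B returns the words of sentence_input[sp:] up to and including the first stopping element, the intended 'sentence words from this position on'. — e.g. on get_string_in_between(-1, "NP", ["a\tDT\ta", "sat\tVBD\tsit"]): A returns ["sat\tVBD\tsit", "a\tDT\ta", "sat\tVBD\tsit"], B returns ["sat\tVBD\tsit"]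
import Mathlib
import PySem

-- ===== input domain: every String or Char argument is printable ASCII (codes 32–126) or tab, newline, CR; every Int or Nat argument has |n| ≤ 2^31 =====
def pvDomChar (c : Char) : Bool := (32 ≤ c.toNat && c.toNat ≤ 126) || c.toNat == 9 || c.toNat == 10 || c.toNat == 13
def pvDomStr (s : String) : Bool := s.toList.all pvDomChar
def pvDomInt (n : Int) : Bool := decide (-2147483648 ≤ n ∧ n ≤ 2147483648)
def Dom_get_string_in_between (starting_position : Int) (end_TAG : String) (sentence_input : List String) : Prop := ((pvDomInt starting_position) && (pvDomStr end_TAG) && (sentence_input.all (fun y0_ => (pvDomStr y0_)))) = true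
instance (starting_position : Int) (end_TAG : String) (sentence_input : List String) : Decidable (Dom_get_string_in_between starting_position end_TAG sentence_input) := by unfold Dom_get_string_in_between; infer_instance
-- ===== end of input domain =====

-- B replaces A's accumulate-and-early-return index loop by staged full passes: slice off
-- the suffix, collect the index list of ALL stopping elements (no early exit), and slice
-- up to min(stops)+1 when that list is nonempty (objective: alternative, no speed claim).

-- ===== PORT A =====
-- Loop of A over the Python range indices; 'none' from pyGet? is Python's IndexError
-- (excluded by Pre_), the loop result there is unspecified (we return acc).
def gsbA_loop (end_TAG : String) (si : List String) : List Int → List String → List String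
  | [], acc => acc
  | i :: rest, acc =>
    match PySem.List.pyGet? si i with
    | none => acc
    | some sts =>
      let wds := (PySem.Str.split? sts "\t").getD []
      let tag := if 1 < wds.length then wds.getD 1 "" else ""
      let word := if wds.getD 0 "" ≠ "" then PySem.Str.lower (wds.getD 0 "") else ""
      if tag = "SENT" ∨ tag = "," ∨ word = "that" ∨ word = "then" ∨ tag = "CC" ∨ tag = end_TAG
      then acc ++ [sts]
      else gsbA_loop end_TAG si rest (acc ++ [sts])

def get_string_in_between (starting_position : Int) (end_TAG : String) (sentence_input : List String) : List String :=
  gsbA_loop end_TAG sentence_input (PySem.List.pyRange starting_position (sentence_input.length : Int) 1) []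

-- ===== PORT B =====
-- B's helper _stops(sts, end_TAG)
def gsbB_stop (end_TAG : String) (sts : String) : Bool :=
  let wds := (PySem.Str.split? sts "\t").getD []
  let tag := if 1 < wds.length then wds.getD 1 "" else ""
  let word := if wds.getD 0 "" ≠ "" then PySem.Str.lower (wds.getD 0 "") else ""
  decide (tag = "SENT" ∨ tag = "," ∨ word = "that" ∨ word = "then" ∨ tag = "CC" ∨ tag = end_TAG)

-- B's comprehension '[i for i, s in enumerate(segment) if _stops(s, end_TAG)]'
def gsbB_stopIdxs (end_TAG : String) (seg : List String) : List Int :=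
  ((PySem.List.enumerate seg).filter (fun p => gsbB_stop end_TAG p.2)).map Prod.fst

def get_string_in_between_alt (starting_position : Int) (end_TAG : String) (sentence_input : List String) : List String :=
  let segment := PySem.List.slice sentence_input (some starting_position) none
  let stops := gsbB_stopIdxs end_TAG segment
  match PySem.List.min? stops (fun x => x) with
  | some i => PySem.List.slice segment none (some (i + 1))
  | none => segment

-- ===== PRECONDITION & SPEC =====
-- A raises IndexError when starting_position < -len(sentence_input) (range then yields an
-- out-of-range negative index); exactly those inputs are excluded.
def Pre_get_string_in_between (starting_position : Int) (end_TAG : String) (sentence_input : List String) : Prop :=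
  -(sentence_input.length : Int) ≤ starting_position

instance (starting_position : Int) (end_TAG : String) (sentence_input : List String) : Decidable (Pre_get_string_in_between starting_position end_TAG sentence_input) := by unfold Pre_get_string_in_between; infer_instance

def pvWitness_get_string_in_between : Int × String × List String := (0, "NP", ["a\tDT\ta", "cat\tNP\tcat", "sat\tVBD\tsit", ".\tSENT\t."])

-- On a negative starting_position A applies Python negative indexing inside range(sp, len):
-- it walks the last |sp| elements and then, unless one of them is a stopping element, walks
-- the WHOLE list again from index 0, returning the suffix plus a re-scan of the list; B
-- returns the words of sentence_input[sp:] up to and including the first stopping element,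
-- the intended 'sentence words from this position on'.
def D_get_string_in_between (starting_position : Int) (end_TAG : String) (sentence_input : List String) : Prop :=
  starting_position < 0

instance (starting_position : Int) (end_TAG : String) (sentence_input : List String) : Decidable (D_get_string_in_between starting_position end_TAG sentence_input) := by unfold D_get_string_in_between; infer_instance

def Spec_get_string_in_between (starting_position : Int) (end_TAG : String) (sentence_input : List String) (out : List String) : Prop := ¬ D_get_string_in_between starting_position end_TAG sentence_input → out = get_string_in_between_alt starting_position end_TAG sentence_input
instance (starting_position : Int) (end_TAG : String) (sentence_input : List String) (out : List String) : Decidable (Spec_get_string_in_between starting_position end_TAG sentence_input out) := by unfold Spec_get_string_in_between; infer_instance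

def pvDiffWitness_get_string_in_between : Int × String × List String := (-1, "NP", ["a\tDT\ta", "sat\tVBD\tsit"])
def pvDiffWitnessOut_get_string_in_between : (List String) × (List String) :=
  (["sat\tVBD\tsit", "a\tDT\ta", "sat\tVBD\tsit"], ["sat\tVBD\tsit"])

-- ===== CLAIM (what is proved, stated in full; the proofs are below) =====
def Claim_unchanged_get_string_in_between : Prop := ∀ (starting_position : Int) (end_TAG : String) (sentence_input : List String), Dom_get_string_in_between starting_position end_TAG sentence_input → Pre_get_string_in_between starting_position end_TAG sentence_input → Spec_get_string_in_between starting_position end_TAG sentence_input (get_string_in_between starting_position end_TAG sentence_input)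
def Claim_changed_get_string_in_between : Prop := Dom_get_string_in_between (pvDiffWitness_get_string_in_between.1) (pvDiffWitness_get_string_in_between.2.1) (pvDiffWitness_get_string_in_between.2.2) ∧ Pre_get_string_in_between (pvDiffWitness_get_string_in_between.1) (pvDiffWitness_get_string_in_between.2.1) (pvDiffWitness_get_string_in_between.2.2) ∧ D_get_string_in_between (pvDiffWitness_get_string_in_between.1) (pvDiffWitness_get_string_in_between.2.1) (pvDiffWitness_get_string_in_between.2.2) ∧ get_string_in_between (pvDiffWitness_get_string_in_between.1) (pvDiffWitness_get_string_in_between.2.1) (pvDiffWitness_get_string_in_between.2.2) = pvDiffWitnessOut_get_string_in_between.1 ∧ get_string_in_between_alt (pvDiffWitness_get_string_in_between.1) (pvDiffWitness_get_string_in_between.2.1) (pvDiffWitness_get_string_in_between.2.2) = pvDiffWitnessOut_get_string_in_between.2 ∧ pvDiffWitnessOut_get_string_in_between.1 ≠ pvDiffWitnessOut_get_string_in_between.2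
-- ===== LEMMAS AND PROOFS =====

-- reference run: take elements up to and including the first stopper
def pvRun (e : String) : List String → List String
  | [] => []
  | s :: rest => if gsbB_stop e s then [s] else s :: pvRun e rest

theorem pvRun_of_no_stop (e : String) (l : List String) (h : l.all (fun s => !(gsbB_stop e s)) = true) :
    pvRun e l = l := by
  induction l with
  | nil => rfl
  | cons s rest ih =>
    simp only [List.all_cons, Bool.and_eq_true, Bool.not_eq_eq_eq_not, Bool.not_true] at h
    simp [pvRun, h.1, ih h.2]

-- ===== B-side: the staged passes compute pvRun of the sliced suffix =====

-- min? of a list whose tail is bounded below by the head is the head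
theorem pv_min?_cons_of_le (a : Int) (t : List Int) (h : ∀ x ∈ t, a ≤ x) :
    PySem.List.min? (a :: t) (fun x => x) = some a := by
  rw [PySem.List.min?_id_cons]
  rcases PySem.List.foldl_min_mem t a with hm | hm
  · rw [hm]
  · have h1 := (PySem.List.foldl_min_le t a).1
    have h2 := h _ hm
    have : t.foldl min a = a := le_antisymm h1 h2
    rw [this]

-- min of the collected indices is the first stop index
theorem gsbB_min_eq (e : String) (l : List String) : ∀ (k : Int),
    PySem.List.min? (((PySem.List.enumerate l k).filter (fun p => gsbB_stop e p.2)).map Prod.fst) (fun x => x)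
      = (l.findIdx? (gsbB_stop e)).map (fun j => k + (j : Int)) := by
  induction l with
  | nil => intro k; simp [PySem.List.enumerate_nil, PySem.List.min?]
  | cons s rest ih =>
    intro k
    rw [PySem.List.enumerate_cons, List.filter_cons, List.findIdx?_cons]
    by_cases hs : gsbB_stop e s = true
    · simp only [hs, if_true, List.map_cons]
      rw [pv_min?_cons_of_le]
      · simp
      · intro x hx
        obtain ⟨p, hp, rfl⟩ := List.mem_map.mp hx
        have hpe := (List.mem_filter.mp hp).1
        obtain ⟨j, hj, rfl⟩ := (PySem.List.mem_enumerate_iff _ _ _).mp hpe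
        simp; omega
    · simp only [hs, Bool.false_eq_true, if_false]
      rw [ih (k + 1)]
      cases rest.findIdx? (gsbB_stop e) <;> simp <;> omega

theorem pvRun_eq_take (e : String) : ∀ (l : List String) (j : Nat),
    l.findIdx? (gsbB_stop e) = some j → pvRun e l = l.take (j + 1) := by
  intro l
  induction l with
  | nil => intro j h; simp [List.findIdx?_nil] at h
  | cons s rest ih =>
    intro j h
    rw [List.findIdx?_cons] at h
    by_cases hs : gsbB_stop e s = true
    · simp [hs] at h
      simp [pvRun, hs, ← h]
    · simp [hs] at h
      obtain ⟨j', hj', rfl⟩ := h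
      simp [pvRun, hs, ih j' hj']

theorem alt_eq_pvRun (sp : Int) (e : String) (si : List String) :
    get_string_in_between_alt sp e si = pvRun e (PySem.List.slice si (some sp) none) := by
  simp only [get_string_in_between_alt, gsbB_stopIdxs]
  set seg := PySem.List.slice si (some sp) none with hseg
  rw [show PySem.List.enumerate seg = PySem.List.enumerate seg 0 from rfl, gsbB_min_eq e seg 0]
  cases hf : seg.findIdx? (gsbB_stop e) with
  | none =>
    have hall : seg.all (fun s => !(gsbB_stop e s)) = true := by
      rw [List.all_eq_true]
      intro x hx
      have h := List.findIdx?_eq_none_iff.mp hf x hx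
      simp [h]
    simp [pvRun_of_no_stop e seg hall]
  | some j =>
    rw [pvRun_eq_take e seg j hf]
    show PySem.List.slice seg none (some ((0 : Int) + (j : Int) + 1)) = seg.take (j + 1)
    rw [show (0 : Int) + (j : Int) + 1 = ((j + 1 : Nat) : Int) by push_cast; ring]
    exact PySem.List.slice_to_natCast seg (j + 1)

-- ===== A-side: the loop equals pvRun of the suffix =====

theorem gsbA_loop_cons (e : String) (si : List String) (i : Int) (rest : List Int)
    (acc : List String) (sts : String) (h : PySem.List.pyGet? si i = some sts) :
    gsbA_loop e si (i :: rest) acc =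
      if gsbB_stop e sts then acc ++ [sts] else gsbA_loop e si rest (acc ++ [sts]) := by
  simp only [gsbA_loop, h, gsbB_stop]
  split_ifs with h1 h2 h2 <;> simp_all

-- nonnegative phase: the loop from index k ≥ 0 appends pvRun of the suffix
theorem gsbA_loop_nonneg (e : String) (si : List String) : ∀ (m : Nat) (k : Int) (acc : List String),
    0 ≤ k → m = ((si.length : Int) - k).toNat →
    gsbA_loop e si (PySem.List.pyRange k (si.length : Int) 1) acc = acc ++ pvRun e (si.drop k.toNat) := by
  intro m
  induction m with
  | zero =>
    intro k acc hk hm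
    have hkn : (si.length : Int) ≤ k := by omega
    rw [PySem.List.pyRange_one_eq_nil hkn]
    have : si.drop k.toNat = [] := List.drop_eq_nil_of_le (by omega)
    simp [gsbA_loop, this, pvRun]
  | succ m ih =>
    intro k acc hk hm
    have hlt : k < (si.length : Int) := by omega
    have hidx : k.toNat < si.length := by omega
    rw [PySem.List.pyRange_one_cons hlt]
    have hget : PySem.List.pyGet? si k = some si[k.toNat] := by
      rw [PySem.List.pyGet?_of_nonneg si hk]
      exact List.getElem?_eq_getElem hidx
    rw [gsbA_loop_cons e si k _ acc si[k.toNat] hget]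
    have hdrop : si.drop k.toNat = si[k.toNat] :: si.drop (k.toNat + 1) :=
      List.drop_eq_getElem_cons hidx
    by_cases hs : gsbB_stop e si[k.toNat] = true
    · rw [if_pos hs, hdrop]
      simp [pvRun, hs]
    · rw [if_neg (by simp [hs]), ih (k + 1) (acc ++ [si[k.toNat]]) (by omega) (by omega)]
      rw [hdrop]
      have : (k + 1).toNat = k.toNat + 1 := by omega
      simp [pvRun, hs, this]

-- ===== VERDICT (by name: the statement is the Claim_ definition above) =====
theorem get_string_in_between_spec : Claim_unchanged_get_string_in_between := by
  intro sp e si _ _ hnd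
  unfold D_get_string_in_between at hnd
  have hsp : 0 ≤ sp := by omega
  unfold get_string_in_between
  rw [alt_eq_pvRun]
  rw [gsbA_loop_nonneg e si ((si.length : Int) - sp).toNat sp [] hsp rfl]
  rw [PySem.List.slice_from si hsp]
  simp

theorem get_string_in_between_changed : Claim_changed_get_string_in_between := by
  unfold Claim_changed_get_string_in_between; decide
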